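-- pv_equiv track=rewrite | github.com/pypi-data/pypi-mirror-403 | packages/visualbench/visualbench-1.0.6.tar.gz/visualbench-1.0.6/visualbench/tasks/graph_layout.py | _barbell_graph
-- ===== SOURCE A (Python) =====
-- def _barbell_graph(clique_size: int = 10) -> list[list[int]]:
--     """Generates a barbell graph: two K_m cliques connected by a single edge."""
--     if clique_size <= 0: return []
--     if clique_size == 1:
--         return [[1], [0]]
--
--     n = 2 * clique_size
--     adj = [[] for _ in range(n)]
--
--     # first clique (nodes 0 to clique_size - 1)
--     for i in range(clique_size):
--         for j in range(i + 1, clique_size):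
--             adj[i].append(j)
--             adj[j].append(i)
--
--     # second clique (nodes clique_size to 2*clique_size - 1)
--     for i in range(clique_size, n):
--         for j in range(i + 1, n):
--             adj[i].append(j)
--             adj[j].append(i)
--
--     # connecting edge (connect last node of first clique to first node of second clique)
--     node1 = clique_size - 1
--     node2 = clique_size
--     adj[node1].append(node2)
--     adj[node2].append(node1)
--
--     return adj
-- ===== SOURCE B (Python) =====
-- def _barbell_graph(clique_size: int = 10) -> list[list[int]]:
--     """Generates a barbell graph: two K_m cliques connected by a single edge."""
--     if clique_size <= 0:
--         return []
--     m = clique_size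
--     nodes = list(range(m))
--     # build ONE clique's adjacency by slicing the node list (row i = nodes without i) ...
--     first = [nodes[:i] + nodes[i + 1:] for i in range(m)]
--     # ... and obtain the second clique by translating the first by m
--     adj = first + [[x + m for x in row] for row in first]
--     adj[m - 1].append(m)
--     adj[m].append(m - 1)
--     return adj
-- ===== Notes on version B (the rewrite author's own statement) =====
-- stated objective: alternative
-- what changed: A writes edges pair-by-pair, appending to both endpoint rows in two nested double loops plus a separate branch for the smallest clique; B builds only ONE clique's adjacency, each row by slicing the node list (nodes[:i]+nodes[i+1:]), obtains the second clique by translating every row of the first by m, and then appends the bridge edge, with no special-case branch.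
import Mathlib
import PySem

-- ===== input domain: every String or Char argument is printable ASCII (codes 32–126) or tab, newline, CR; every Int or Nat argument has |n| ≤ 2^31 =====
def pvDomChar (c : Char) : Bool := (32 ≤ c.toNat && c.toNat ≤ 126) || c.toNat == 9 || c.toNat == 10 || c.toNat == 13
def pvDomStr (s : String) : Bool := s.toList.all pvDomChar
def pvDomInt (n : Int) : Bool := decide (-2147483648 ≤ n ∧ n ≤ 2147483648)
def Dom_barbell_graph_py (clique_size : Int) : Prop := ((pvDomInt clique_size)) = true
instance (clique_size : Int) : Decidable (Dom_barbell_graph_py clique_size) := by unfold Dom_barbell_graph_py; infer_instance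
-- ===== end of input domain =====

-- B replaces A's edge-centric double loops (append each pair to both endpoint rows, plus an
-- m == 1 special case) by building only ONE clique's rows by slicing the node list and
-- translating them by m for the second clique; objective: alternative decomposition, same cost.

-- ===== PORT A =====

-- adj[i].append(v)
def pvPush (adj : List (List Int)) (i : Nat) (v : Int) : List (List Int) :=
  adj.modify i (· ++ [v])

def barbell_graph_py (clique_size : Int) : List (List Int) :=
  if clique_size ≤ 0 then []
  else if clique_size = 1 then [[1], [0]]
  else
    let m := clique_size.toNat
    let n := 2 * m
    let adj0 := List.replicate n ([] : List Int)
    -- first clique: for i in range(clique_size): for j in range(i+1, clique_size): …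
    let adj1 := (List.range' 0 m).foldl (fun adj (i : Nat) =>
      (List.range' (i + 1) (m - (i + 1))).foldl
        (fun adj (j : Nat) => pvPush (pvPush adj i (j : Int)) j (i : Int)) adj) adj0
    -- second clique: for i in range(clique_size, n): for j in range(i+1, n): …
    let adj2 := (List.range' m (n - m)).foldl (fun adj (i : Nat) =>
      (List.range' (i + 1) (n - (i + 1))).foldl
        (fun adj (j : Nat) => pvPush (pvPush adj i (j : Int)) j (i : Int)) adj) adj1
    -- connecting edge
    let adj3 := pvPush adj2 (m - 1) (m : Int)
    pvPush adj3 m ((m : Int) - 1)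

-- ===== PORT B =====

-- nodes = list(range(m))
def pvNodes (m : Nat) : List Int := (List.range m).map (fun (j : Nat) => (j : Int))

-- nodes[:i] + nodes[i+1:]
def pvRowB (nodes : List Int) (i : Nat) : List Int := nodes.take i ++ nodes.drop (i + 1)

def barbell_graph_py_alt (clique_size : Int) : List (List Int) :=
  if clique_size ≤ 0 then []
  else
    let m := clique_size.toNat
    let nodes := pvNodes m
    let first := (List.range m).map (fun i => pvRowB nodes i)
    let adj := first ++ first.map (fun row => row.map (fun x => x + (m : Int)))
    ((adj.modify (m - 1) (· ++ [(m : Int)])).modify m (· ++ [(m : Int) - 1]))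

-- ===== PRECONDITION & SPEC =====
def Spec_barbell_graph_py (clique_size : Int) (out : List (List Int)) : Prop := out = barbell_graph_py_alt clique_size
instance (clique_size : Int) (out : List (List Int)) : Decidable (Spec_barbell_graph_py clique_size out) := by unfold Spec_barbell_graph_py; infer_instance

-- ===== CLAIM (what is proved, stated in full; the proofs are below) =====
def Claim_equal_barbell_graph_py : Prop := ∀ (clique_size : Int), Dom_barbell_graph_py clique_size → Spec_barbell_graph_py clique_size (barbell_graph_py clique_size)

-- ===== LEMMAS AND PROOFS =====

-- common normal form: row p of a clique on nodes [a, a+len)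
def nfRow (a len p : Nat) : List Int :=
  (List.range' a (p - a)).map (fun (i : Nat) => (i : Int))
    ++ (List.range' (p + 1) (a + len - (p + 1))).map (fun (j : Nat) => (j : Int))

theorem pvPush_getElem? (adj : List (List Int)) (i : Nat) (v : Int) (p : Nat) :
    (pvPush adj i v)[p]? = if p = i then adj[p]?.map (· ++ [v]) else adj[p]? := by
  unfold pvPush
  rw [List.getElem?_modify]
  by_cases h : p = i
  · subst h; cases adj[p]? <;> simp
  · have h' : ¬ i = p := fun e => h e.symm
    cases adj[p]? <;> simp [h, h']

-- effect of A's inner loop (fixed outer index i, j running over [s, s+len)) on row p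
theorem innerLoop_getElem? (len : Nat) : ∀ (s : Nat) (adj : List (List Int)) (i p : Nat),
    i < s →
    ((List.range' s len).foldl (fun adj (j : Nat) => pvPush (pvPush adj i (j : Int)) j (i : Int)) adj)[p]?
      = if p = i then adj[p]?.map (· ++ (List.range' s len).map (fun (j : Nat) => (j : Int)))
        else if s ≤ p ∧ p < s + len then adj[p]?.map (· ++ [(i : Int)])
        else adj[p]? := by
  induction len with
  | zero =>
    intro s adj i p _
    simp only [List.range'_zero, List.foldl_nil, List.map_nil]
    split_ifs with h1 h2
    · cases adj[p]? <;> simp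
    · omega
    · rfl
  | succ k ih =>
    intro s adj i p his
    rw [List.range'_succ]
    simp only [List.foldl_cons]
    rw [ih (s + 1) _ i p (by omega)]
    by_cases hpi : p = i
    · subst hpi
      rw [if_pos rfl, if_pos rfl, pvPush_getElem?, pvPush_getElem?]
      rw [if_neg (show ¬ p = s by omega), if_pos rfl]
      cases adj[p]? <;> simp
    · rw [if_neg hpi, if_neg hpi, pvPush_getElem?, pvPush_getElem?]
      by_cases hps : p = s
      · subst hps
        rw [if_pos rfl, if_neg hpi,
            if_neg (show ¬ (p + 1 ≤ p ∧ p < p + 1 + k) by omega),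
            if_pos (show p ≤ p ∧ p < p + (k + 1) by omega)]
      · rw [if_neg hps, if_neg hpi]
        by_cases h4 : s + 1 ≤ p ∧ p < s + 1 + k
        · rw [if_pos h4, if_pos (show s ≤ p ∧ p < s + (k + 1) by omega)]
        · rw [if_neg h4, if_neg (show ¬ (s ≤ p ∧ p < s + (k + 1)) by omega)]

-- what A's outer loop (i over [a, a+k), pairs bounded by b) has appended to row p so far
def pvContrib (a k b p : Nat) : List Int :=
  if p < b ∧ a ≤ p then
    (List.range' a (min k (p - a))).map (fun (i : Nat) => (i : Int))
      ++ (if p < a + k then (List.range' (p + 1) (b - (p + 1))).map (fun (j : Nat) => (j : Int)) else [])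
  else []

theorem pvContrib_zero (a b p : Nat) : pvContrib a 0 b p = [] := by
  unfold pvContrib
  split_ifs with h1 h2
  · omega
  · simp
  · rfl

theorem contrib_step (a k b p : Nat) (hab : a + k + 1 ≤ b) :
    (if p = a then (List.range' (a + 1) (b - (a + 1))).map (fun (j : Nat) => (j : Int))
     else if a + 1 ≤ p ∧ p < a + 1 + (b - (a + 1)) then [(a : Int)] else [])
      ++ pvContrib (a + 1) k b p = pvContrib a (k + 1) b p := by
  unfold pvContrib
  by_cases hpb : p < b
  · by_cases hpa : p = a
    · subst hpa
      rw [if_pos rfl,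
          if_neg (show ¬ (p < b ∧ p + 1 ≤ p) by omega),
          if_pos (show p < b ∧ p ≤ p by omega),
          if_pos (show p < p + (k + 1) by omega)]
      have : min (k + 1) (p - p) = 0 := by omega
      rw [this]
      simp
    · by_cases hap : a < p
      · rw [if_neg hpa,
            if_pos (show a + 1 ≤ p ∧ p < a + 1 + (b - (a + 1)) by omega),
            if_pos (show p < b ∧ a + 1 ≤ p by omega),
            if_pos (show p < b ∧ a ≤ p by omega)]
        have hmin : min (k + 1) (p - a) = (min k (p - (a + 1))) + 1 := by omega
        rw [hmin, List.range'_succ, List.map_cons]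
        by_cases hpk : p < a + 1 + k
        · rw [if_pos hpk, if_pos (show p < a + (k + 1) by omega)]
          simp
        · rw [if_neg hpk, if_neg (show ¬ p < a + (k + 1) by omega)]
          simp
      · have hp : p < a := by omega
        rw [if_neg hpa,
            if_neg (show ¬ (a + 1 ≤ p ∧ p < a + 1 + (b - (a + 1))) by omega),
            if_neg (show ¬ (p < b ∧ a + 1 ≤ p) by omega),
            if_neg (show ¬ (p < b ∧ a ≤ p) by omega)]
        rfl
  · rw [if_neg (show ¬ p = a by omega),
        if_neg (show ¬ (a + 1 ≤ p ∧ p < a + 1 + (b - (a + 1))) by omega),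
        if_neg (show ¬ (p < b ∧ a + 1 ≤ p) by omega),
        if_neg (show ¬ (p < b ∧ a ≤ p) by omega)]
    rfl

theorem outerLoop_getElem? (k : Nat) : ∀ (a b : Nat) (adj : List (List Int)) (p : Nat),
    a + k ≤ b →
    ((List.range' a k).foldl (fun adj (i : Nat) =>
        (List.range' (i + 1) (b - (i + 1))).foldl
          (fun adj (j : Nat) => pvPush (pvPush adj i (j : Int)) j (i : Int)) adj) adj)[p]?
      = adj[p]?.map (· ++ pvContrib a k b p) := by
  induction k with
  | zero =>
    intro a b adj p _
    rw [pvContrib_zero]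
    simp
  | succ k ih =>
    intro a b adj p hab
    rw [List.range'_succ]
    simp only [List.foldl_cons]
    rw [ih (a + 1) b _ p (by omega)]
    rw [innerLoop_getElem? (b - (a + 1)) (a + 1) adj a p (by omega)]
    rw [← contrib_step a k b p (by omega)]
    split_ifs with h1 h2 <;> cases adj[p]? <;> simp

-- A's two clique loops build exactly the nfRow rows
theorem adjBase_eq (m : Nat) (hm : 1 ≤ m) :
    ((List.range' m (2 * m - m)).foldl (fun adj (i : Nat) =>
      (List.range' (i + 1) (2 * m - (i + 1))).foldl
        (fun adj (j : Nat) => pvPush (pvPush adj i (j : Int)) j (i : Int)) adj)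
      ((List.range' 0 m).foldl (fun adj (i : Nat) =>
        (List.range' (i + 1) (m - (i + 1))).foldl
          (fun adj (j : Nat) => pvPush (pvPush adj i (j : Int)) j (i : Int)) adj)
        (List.replicate (2 * m) ([] : List Int))))
    = ((List.range' 0 m).map (fun i => nfRow 0 m i))
        ++ ((List.range' m m).map (fun i => nfRow m m i)) := by
  have h2m : 2 * m - m = m := by omega
  rw [h2m]
  apply List.ext_getElem?
  intro p
  rw [outerLoop_getElem? m m (2 * m) _ p (by omega)]
  rw [outerLoop_getElem? m 0 m _ p (by omega)]
  by_cases hp1 : p < m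
  · rw [List.getElem?_append_left (by simpa using hp1)]
    rw [List.getElem?_map, List.getElem?_range' hp1]
    rw [List.getElem?_replicate, if_pos (show p < 2 * m by omega)]
    simp only [Option.map_some, List.nil_append]
    have hc2 : pvContrib m m (2 * m) p = [] := by
      unfold pvContrib
      rw [if_neg (show ¬ (p < 2 * m ∧ m ≤ p) by omega)]
    have hc1 : pvContrib 0 m m p
        = (List.range' 0 p).map (fun (i : Nat) => (i : Int))
          ++ (List.range' (p + 1) (m - (p + 1))).map (fun (j : Nat) => (j : Int)) := by
      unfold pvContrib
      rw [if_pos (show p < m ∧ 0 ≤ p by omega), if_pos (show p < 0 + m by omega),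
          show min m (p - 0) = p from by omega]
    rw [hc2, hc1, List.append_nil]
    unfold nfRow
    rw [show 0 + 1 * p = p from by omega, show p - 0 = p from rfl,
        show 0 + m - (p + 1) = m - (p + 1) from by omega]
  · by_cases hp2 : p < 2 * m
    · rw [List.getElem?_append_right (by simpa using (show ¬ p < m by omega))]
      simp only [List.length_map, List.length_range']
      rw [List.getElem?_map, List.getElem?_range' (show p - m < m by omega)]
      rw [List.getElem?_replicate, if_pos hp2]
      simp only [Option.map_some, List.nil_append]
      have hc1 : pvContrib 0 m m p = [] := by
        unfold pvContrib
        rw [if_neg (show ¬ (p < m ∧ 0 ≤ p) by omega)]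
      have hc2 : pvContrib m m (2 * m) p
          = (List.range' m (p - m)).map (fun (i : Nat) => (i : Int))
            ++ (List.range' (p + 1) (2 * m - (p + 1))).map (fun (j : Nat) => (j : Int)) := by
        unfold pvContrib
        rw [if_pos (show p < 2 * m ∧ m ≤ p by omega), if_pos (show p < m + m by omega),
            show min m (p - m) = p - m from by omega]
      rw [hc1, hc2, List.nil_append]
      unfold nfRow
      rw [show m + 1 * (p - m) = p from by omega,
          show m + m - (p + 1) = 2 * m - (p + 1) from by omega]
    · rw [List.getElem?_replicate, if_neg (show ¬ p < 2 * m by omega)]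
      rw [List.getElem?_eq_none (by simp; omega)]
      rfl

-- B's sliced row equals the normal form
theorem pvRowB_eq (m i : Nat) (hi : i < m) : pvRowB (pvNodes m) i = nfRow 0 m i := by
  have hsplit : List.range m
      = List.range' 0 i ++ i :: List.range' (i + 1) (m - (i + 1)) := by
    rw [List.range_eq_range']
    have e1 : List.range' 0 (i + ((m - (i + 1)) + 1))
        = List.range' 0 i ++ List.range' (0 + i) ((m - (i + 1)) + 1) := by
      rw [List.range'_append_1]
    conv_lhs => rw [show m = i + ((m - (i + 1)) + 1) from by omega]
    rw [e1, show 0 + i = i from by omega, List.range'_succ]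
  unfold pvRowB pvNodes nfRow
  rw [hsplit, List.map_append, List.map_cons]
  have hA : ((List.range' 0 i).map (fun (j : Nat) => (j : Int))).length = i := by simp
  have ht : (((List.range' 0 i).map (fun (j : Nat) => (j : Int)))
        ++ ((i : Int) :: (List.range' (i + 1) (m - (i + 1))).map (fun (j : Nat) => (j : Int)))).take i
      = (List.range' 0 i).map (fun (j : Nat) => (j : Int)) := by
    rw [List.take_append_of_le_length (by omega)]
    exact List.take_of_length_le (le_of_eq hA)
  have hd : (((List.range' 0 i).map (fun (j : Nat) => (j : Int)))
        ++ ((i : Int) :: (List.range' (i + 1) (m - (i + 1))).map (fun (j : Nat) => (j : Int)))).drop (i + 1)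
      = (List.range' (i + 1) (m - (i + 1))).map (fun (j : Nat) => (j : Int)) := by
    rw [show i + 1 = ((List.range' 0 i).map (fun (j : Nat) => (j : Int))).length + 1 from by
          rw [hA]]
    rw [List.drop_append]
    simp
  rw [ht, hd, show i - 0 = i from rfl, show 0 + m - (i + 1) = m - (i + 1) from by omega]

-- translating the normal-form first-clique row by m gives the second-clique row
theorem nfRow_translate (m i : Nat) (hi : i < m) :
    (nfRow 0 m i).map (fun x => x + (m : Int)) = nfRow m m (m + i) := by
  unfold nfRow
  rw [show m + i - m = i from by omega,
      show m + m - (m + i + 1) = m - (i + 1) from by omega,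
      show i - 0 = i from rfl, show 0 + m - (i + 1) = m - (i + 1) from by omega]
  rw [List.map_append, List.map_map, List.map_map]
  congr 1
  · rw [show List.range' m i = (List.range' 0 i).map (fun x => x + m) from by
        rw [List.range'_eq_map_range, List.range'_eq_map_range, List.map_map]
        apply List.map_congr_left; intro x _; simp; omega]
    rw [List.map_map]
    apply List.map_congr_left; intro x _
    simp only [Function.comp]
    push_cast; ring
  · rw [show List.range' (m + i + 1) (m - (i + 1))
          = (List.range' (i + 1) (m - (i + 1))).map (fun x => x + m) from by
        rw [List.range'_eq_map_range, List.range'_eq_map_range, List.map_map]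
        apply List.map_congr_left; intro x _; simp; omega]
    rw [List.map_map]
    apply List.map_congr_left; intro x _
    simp only [Function.comp]
    push_cast; ring

-- B's base list equals the same normal form as A's
theorem B_base_eq (m : Nat) :
    ((List.range m).map (fun i => pvRowB (pvNodes m) i))
      ++ ((List.range m).map (fun i => pvRowB (pvNodes m) i)).map
            (fun row => row.map (fun x => x + (m : Int)))
    = ((List.range' 0 m).map (fun i => nfRow 0 m i))
        ++ ((List.range' m m).map (fun i => nfRow m m i)) := by
  congr 1
  · rw [List.range_eq_range']
    apply List.map_congr_left
    intro i hi
    exact pvRowB_eq m i (by have := List.mem_range'.mp hi; omega)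
  · rw [List.map_map, show List.range' m m = (List.range m).map (fun i => m + i) from by
        rw [List.range'_eq_map_range]]
    rw [List.map_map]
    apply List.map_congr_left
    intro i hi
    have him : i < m := List.mem_range.mp hi
    simp only [Function.comp]
    rw [pvRowB_eq m i him, nfRow_translate m i him]

theorem main_eq (clique_size : Int) :
    barbell_graph_py clique_size = barbell_graph_py_alt clique_size := by
  by_cases h0 : clique_size ≤ 0
  · simp [barbell_graph_py, barbell_graph_py_alt, h0]
  · by_cases h1 : clique_size = 1
    · subst h1; decide
    · have hm : 1 ≤ clique_size.toNat := by omega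
      simp only [barbell_graph_py, barbell_graph_py_alt, if_neg h0, if_neg h1]
      rw [adjBase_eq clique_size.toNat hm, ← B_base_eq]
      rfl

-- ===== VERDICT (by name: the statement is the Claim_ definition above) =====
theorem barbell_graph_py_spec : Claim_equal_barbell_graph_py := by
  intro cs _
  unfold Spec_barbell_graph_py
  exact main_eq cs
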